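-- pv_equiv track=rewrite | github.com/MBolliny/exam-analyzer | script/file_manipulation.py | confronto
-- ===== SOURCE A (Python) =====
-- def confronto(lista_tuple, full_word_list, dizionario_conta):
--     for keyword in lista_tuple:
--         n = len(keyword)
--         keyword_trovata = False
--
--         for i in range(len(full_word_list) - n + 1):
--             if tuple(full_word_list[i:i + n]) == keyword:
--                 keyword_trovata = True
--                 break
--
--         if keyword_trovata:
--             if keyword in dizionario_conta:
--                 dizionario_conta[keyword] += 1
--             else:
--                 dizionario_conta[keyword] = 1
--
--     return dizionario_conta
-- ===== SOURCE B (Python) =====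
-- def confronto(lista_tuple, full_word_list, dizionario_conta):
--     # index: for each distinct keyword length n, the set of n-grams of full_word_list
--     lengths = {len(k) for k in lista_tuple}
--     grams = {}
--     for n in lengths:
--         grams[n] = {tuple(full_word_list[i:i + n])
--                     for i in range(len(full_word_list) - n + 1)}
--     # tally the found keywords (with multiplicity) in a separate counter
--     found = {}
--     for keyword in lista_tuple:
--         if keyword in grams[len(keyword)]:
--             found[keyword] = found.get(keyword, 0) + 1
--     # merge the tally into dizionario_conta in one pass
--     for keyword, c in found.items():
--         dizionario_conta[keyword] = dizionario_conta.get(keyword, 0) + c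
--     return dizionario_conta
-- ===== Notes on version B (the rewrite author's own statement) =====
-- stated objective: faster
-- what changed: B builds one hash set of n-grams per distinct keyword length (replacing A's per-keyword rescan of full_word_list by a set membership test) and accumulates the found keywords in a separate tally that is merged into dizionario_conta in a single final pass, instead of A's per-occurrence in-place update.
import Mathlib
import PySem

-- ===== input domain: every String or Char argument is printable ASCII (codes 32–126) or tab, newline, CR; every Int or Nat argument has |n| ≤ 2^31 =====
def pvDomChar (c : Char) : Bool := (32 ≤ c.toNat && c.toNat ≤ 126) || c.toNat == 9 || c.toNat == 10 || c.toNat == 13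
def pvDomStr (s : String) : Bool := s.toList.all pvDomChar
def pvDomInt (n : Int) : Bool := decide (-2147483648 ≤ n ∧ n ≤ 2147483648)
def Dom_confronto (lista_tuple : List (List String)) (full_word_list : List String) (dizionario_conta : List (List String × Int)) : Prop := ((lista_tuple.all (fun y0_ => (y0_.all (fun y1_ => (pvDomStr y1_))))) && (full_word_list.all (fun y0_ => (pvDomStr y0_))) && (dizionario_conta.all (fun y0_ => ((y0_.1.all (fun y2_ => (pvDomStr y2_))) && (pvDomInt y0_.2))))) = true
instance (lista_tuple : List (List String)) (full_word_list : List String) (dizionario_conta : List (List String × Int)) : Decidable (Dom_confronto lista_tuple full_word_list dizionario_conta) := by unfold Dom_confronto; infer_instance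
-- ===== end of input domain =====

-- B replaces A's per-keyword rescan of full_word_list by one precomputed n-gram set per distinct
-- keyword length, and replaces A's per-occurrence dict update by a separate tally of the found
-- keywords merged into dizionario_conta in one final pass (objective: faster). Equivalence is about
-- the RETURN value; the Python A mutates dizionario_conta in place (B performs the same mutation).

-- ===== PORT A =====
def confronto (lista_tuple : List (List String)) (full_word_list : List String) (dizionario_conta : List (List String × Int)) : List (List String × Int) :=
  (lista_tuple.foldl (fun d keyword =>
      let n : Int := keyword.length
      -- inner loop with break = any over range(len(full_word_list) - n + 1)
      let keyword_trovata :=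
        (PySem.List.pyRange 0 ((full_word_list.length : Int) - n + 1) 1).any
          (fun i => PySem.List.slice full_word_list (some i) (some (i + n)) == keyword)
      if keyword_trovata then
        if d.contains keyword then
          -- dizionario_conta[keyword] += 1 (key present: guarded by the contains test)
          d.insert keyword (d.getD keyword 0 + 1)
        else d.insert keyword 1
      else d)
    (PySem.Dict.mk dizionario_conta)).items

-- ===== PORT B =====
def confronto_alt (lista_tuple : List (List String)) (full_word_list : List String) (dizionario_conta : List (List String × Int)) : List (List String × Int) :=
  let lengths : PySem.Set Int := PySem.Set.ofList (lista_tuple.map (fun k => (k.length : Int)))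
  let grams : PySem.Dict Int (PySem.Set (List String)) :=
    lengths.foldl (fun g n =>
      g.insert n (PySem.Set.ofList
        ((PySem.List.pyRange 0 ((full_word_list.length : Int) - n + 1) 1).map
          (fun i => PySem.List.slice full_word_list (some i) (some (i + n)))))) PySem.Dict.empty
  -- grams[len(keyword)]: the key is always present (len(keyword) ∈ lengths), so getD is exact
  let found : PySem.Dict (List String) Int :=
    lista_tuple.foldl (fun f keyword =>
      if (grams.getD (keyword.length : Int) []).contains keyword then
        f.insert keyword (f.getD keyword 0 + 1)
      else f) PySem.Dict.empty
  (found.items.foldl (fun d kc => d.insert kc.1 (d.getD kc.1 0 + kc.2))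
    (PySem.Dict.mk dizionario_conta)).items

-- ===== PRECONDITION & SPEC =====
def Spec_confronto (lista_tuple : List (List String)) (full_word_list : List String) (dizionario_conta : List (List String × Int)) (out : List (List String × Int)) : Prop := out = confronto_alt lista_tuple full_word_list dizionario_conta
instance (lista_tuple : List (List String)) (full_word_list : List String) (dizionario_conta : List (List String × Int)) (out : List (List String × Int)) : Decidable (Spec_confronto lista_tuple full_word_list dizionario_conta out) := by unfold Spec_confronto; infer_instance

-- ===== CLAIM (what is proved, stated in full; the proofs are below) =====
def Claim_equal_confronto : Prop := ∀ (lista_tuple : List (List String)) (full_word_list : List String) (dizionario_conta : List (List String × Int)), Dom_confronto lista_tuple full_word_list dizionario_conta → Spec_confronto lista_tuple full_word_list dizionario_conta (confronto lista_tuple full_word_list dizionario_conta)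

-- ===== LEMMAS AND PROOFS =====

-- dBump is proof-side shorthand for the merge step of B's final loop; dBump1 for A's single bump
def dBump (d : PySem.Dict (List String) Int) (kc : List String × Int) : PySem.Dict (List String) Int :=
  d.insert kc.1 (d.getD kc.1 0 + kc.2)
def dBump1 (d : PySem.Dict (List String) Int) (k : List String) : PySem.Dict (List String) Int :=
  d.insert k (d.getD k 0 + 1)

-- a fold of fresh-key inserts leaves a key it never inserts unchanged
theorem getD_foldl_insert_of_not_mem {ν : Type} (l : List Int) (v : Int → ν)
    (g0 : PySem.Dict Int ν) (n : Int) (dflt : ν) (hn : n ∉ l) :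
    (l.foldl (fun g m => g.insert m (v m)) g0).getD n dflt = g0.getD n dflt := by
  induction l generalizing g0 with
  | nil => rfl
  | cons x xs ih =>
    simp only [List.foldl_cons]
    rw [ih _ (fun h => hn (List.mem_cons_of_mem _ h)),
        PySem.Dict.getD_insert_of_ne _ _ _ (by rintro rfl; exact hn List.mem_cons_self)]

-- looking up a key in the grams-building fold returns its value (keys are distinct)
theorem getD_foldl_insert_of_mem {ν : Type} (l : List Int) (v : Int → ν)
    (g0 : PySem.Dict Int ν) (n : Int) (dflt : ν) (hnd : l.Nodup) (hn : n ∈ l) :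
    (l.foldl (fun g m => g.insert m (v m)) g0).getD n dflt = v n := by
  induction l generalizing g0 with
  | nil => cases hn
  | cons x xs ih =>
    simp only [List.foldl_cons]
    rcases List.mem_cons.mp hn with h | h
    · subst h
      rw [getD_foldl_insert_of_not_mem _ _ _ _ _ (List.nodup_cons.mp hnd).1,
          PySem.Dict.getD_insert_self]
    · exact ih _ (List.nodup_cons.mp hnd).2 h

-- for a keyword of lista_tuple, the grams lookup-and-membership test IS A's scanning loop
theorem grams_contains_eq_scan (lista_tuple : List (List String)) (full_word_list : List String)
    (kw : List String) (hkw : kw ∈ lista_tuple) :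
    (((PySem.Set.ofList (lista_tuple.map (fun k => (k.length : Int)))).foldl (fun g n =>
        g.insert n (PySem.Set.ofList
          ((PySem.List.pyRange 0 ((full_word_list.length : Int) - n + 1) 1).map
            (fun i => PySem.List.slice full_word_list (some i) (some (i + n)))))) PySem.Dict.empty).getD
        (kw.length : Int) []).contains kw
      = (PySem.List.pyRange 0 ((full_word_list.length : Int) - (kw.length : Int) + 1) 1).any
          (fun i => PySem.List.slice full_word_list (some i) (some (i + (kw.length : Int))) == kw) := by
  have hmem : ((kw.length : Int)) ∈ (PySem.Set.ofList (lista_tuple.map (fun k => (k.length : Int)))) := by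
    rw [PySem.Set.mem_ofList]
    exact List.mem_map.mpr ⟨kw, hkw, rfl⟩
  rw [getD_foldl_insert_of_mem _ _ _ _ _ (PySem.Set.nodup_ofList _) hmem]
  rcases h : (PySem.List.pyRange 0 ((full_word_list.length : Int) - (kw.length : Int) + 1) 1).any
        (fun i => PySem.List.slice full_word_list (some i) (some (i + (kw.length : Int))) == kw) with _ | _
  · simp only [List.any_eq_false, beq_iff_eq] at h
    simp only [List.contains_eq_mem, decide_eq_false_iff_not]
    rw [PySem.Set.mem_ofList]
    intro hc
    rcases List.mem_map.mp hc with ⟨i, hi, he⟩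
    exact h i hi he
  · simp only [List.any_eq_true, beq_iff_eq] at h
    rcases h with ⟨i, hi, he⟩
    simp only [List.contains_eq_mem, decide_eq_true_eq]
    rw [PySem.Set.mem_ofList]
    exact List.mem_map.mpr ⟨i, hi, he⟩

-- folding dBump over pairs whose keys avoid x does not change the value at x
theorem getD_foldl_dBump_of_ne (rest : List (List String × Int)) (d : PySem.Dict (List String) Int)
    (x : List String) (h : ∀ p ∈ rest, p.1 ≠ x) :
    (rest.foldl dBump d).getD x 0 = d.getD x 0 := by
  induction rest generalizing d with
  | nil => rfl
  | cons p rest ih =>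
    rw [List.foldl_cons, ih _ (fun q hq => h q (List.mem_cons_of_mem _ hq))]
    exact PySem.Dict.getD_insert_of_ne _ _ _ (Ne.symm (h p List.mem_cons_self))

-- two inserts at distinct keys commute when the first key is already present
theorem insert_comm_of_contains (d : PySem.Dict (List String) Int) {x k : List String} (w v : Int)
    (hx : d.contains x = true) (hne : x ≠ k) :
    (d.insert x w).insert k v = (d.insert k v).insert x w := by
  apply PySem.Dict.ext
  by_cases hk : d.contains k = true
  · rw [PySem.Dict.items_insert_of_contains _ v
        (by rw [PySem.Dict.contains_insert]; simp [hk]),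
      PySem.Dict.items_insert_of_contains _ w hx,
      PySem.Dict.items_insert_of_contains _ w
        (by rw [PySem.Dict.contains_insert]; simp [hx]),
      PySem.Dict.items_insert_of_contains _ v hk,
      List.map_map, List.map_map]
    apply List.map_congr_left
    intro p _
    by_cases h1 : p.1 = x <;> by_cases h2 : p.1 = k
    · exact absurd (h1 ▸ h2) hne
    · simp [Function.comp, h1, hne]
    · simp [Function.comp, h2, Ne.symm hne]
    · simp [Function.comp, h1, h2]
  · have hk' : d.contains k = false := by simpa using hk
    rw [PySem.Dict.items_insert_of_not_contains _ v
        (by rw [PySem.Dict.contains_insert]; simp [hk', Ne.symm hne]),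
      PySem.Dict.items_insert_of_contains _ w hx,
      PySem.Dict.items_insert_of_contains _ w
        (by rw [PySem.Dict.contains_insert]; simp [hx]),
      PySem.Dict.items_insert_of_not_contains _ v hk',
      List.map_append]
    simp [Ne.symm hne]

-- an in-place overwrite of a present key commutes with a dBump fold over other keys
theorem foldl_dBump_insert_comm (rest : List (List String × Int)) (d : PySem.Dict (List String) Int)
    (x : List String) (w : Int) (hx : d.contains x = true) (h : ∀ p ∈ rest, p.1 ≠ x) :
    rest.foldl dBump (d.insert x w) = (rest.foldl dBump d).insert x w := by
  induction rest generalizing d w with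
  | nil => rfl
  | cons p rest ih =>
    have hne : p.1 ≠ x := h p List.mem_cons_self
    have hstep : dBump (d.insert x w) p = (dBump d p).insert x w := by
      show (d.insert x w).insert p.1 ((d.insert x w).getD p.1 0 + p.2) = _
      rw [PySem.Dict.getD_insert_of_ne _ _ _ hne]
      exact insert_comm_of_contains d _ _ hx (Ne.symm hne)
    rw [List.foldl_cons, hstep,
        ih _ _ (by simp only [dBump]; rw [PySem.Dict.contains_insert]; simp [hx])
          (fun q hq => h q (List.mem_cons_of_mem _ hq)),
        List.foldl_cons]

-- bumping one entry of an items list (distinct keys) = folding then bumping the result at that key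
theorem foldl_dBump_bumped (its : List (List String × Int)) (d0 : PySem.Dict (List String) Int)
    (x : List String) (hnd : (its.map Prod.fst).Nodup) (hx : x ∈ its.map Prod.fst) :
    (its.map (fun p => if p.1 == x then (p.1, p.2 + 1) else p)).foldl dBump d0
      = dBump1 (its.foldl dBump d0) x := by
  induction its generalizing d0 with
  | nil => cases hx
  | cons p rest ih =>
    obtain ⟨k, v⟩ := p
    rw [List.map_cons, List.nodup_cons] at hnd
    by_cases hkx : k = x
    · subst hkx
      have hrest : ∀ q ∈ rest, q.1 ≠ k := by
        intro q hq hqk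
        exact hnd.1 (by rw [← hqk]; exact List.mem_map.mpr ⟨q, hq, rfl⟩)
      have hhead : (fun p : List String × Int => if p.1 == k then (p.1, p.2 + 1) else p) (k, v)
          = (k, v + 1) := by simp
      have hmap : rest.map (fun p : List String × Int => if p.1 == k then (p.1, p.2 + 1) else p)
          = rest := by
        have hc : ∀ q ∈ rest,
            (fun p : List String × Int => if p.1 == k then (p.1, p.2 + 1) else p) q = id q :=
          fun q hq => by simp [hrest q hq]
        rw [List.map_congr_left hc, List.map_id]
      simp only [List.map_cons, List.foldl_cons, hhead, hmap]
      have e1 : dBump d0 (k, v + 1)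
          = (d0.insert k (d0.getD k 0 + v)).insert k (d0.getD k 0 + v + 1) := by
        rw [PySem.Dict.insert_insert_self]
        show d0.insert k (d0.getD k 0 + (v + 1)) = _
        congr 1
        ring
      have e2 : dBump d0 (k, v) = d0.insert k (d0.getD k 0 + v) := rfl
      rw [e1, foldl_dBump_insert_comm _ _ _ _ (PySem.Dict.contains_insert_self _ _ _) hrest]
      simp only [dBump1, e2]
      rw [getD_foldl_dBump_of_ne _ _ _ hrest, PySem.Dict.getD_insert_self]
    · have hx' : x ∈ rest.map Prod.fst := by
        rcases List.mem_cons.mp hx with h | h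
        · exact absurd h.symm hkx
        · exact h
      have hhead : (fun p : List String × Int => if p.1 == x then (p.1, p.2 + 1) else p) (k, v)
          = (k, v) := by simp [hkx]
      simp only [List.map_cons, List.foldl_cons, hhead]
      exact ih _ hnd.2 hx'

-- modifying a counter entry then merging = merging then bumping the merged dict at that key
theorem foldl_items_modify (c : PySem.Dict (List String) Int) (d0 : PySem.Dict (List String) Int)
    (x : List String) (hnd : c.keys.Nodup) :
    ((c.modify x 0 (· + 1)).items).foldl dBump d0 = dBump1 (c.items.foldl dBump d0) x := by
  have hmod : c.modify x 0 (· + 1) = c.insert x (c.getD x 0 + 1) := rfl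
  rw [hmod]
  by_cases hc : c.contains x = true
  · rw [PySem.Dict.items_insert_of_contains _ _ hc]
    have hmap : c.items.map (fun p => if p.1 == x then (x, c.getD x 0 + 1) else p)
        = c.items.map (fun p => if p.1 == x then (p.1, p.2 + 1) else p) := by
      apply List.map_congr_left
      intro p hp
      by_cases h1 : p.1 = x
      · have hv : c.getD x 0 = p.2 := by
          have hmem : (x, p.2) ∈ c.items := by rw [← h1]; simpa using hp
          exact PySem.Dict.getD_of_mem_items _ hmem hnd 0
        simp [h1, hv]
      · simp [h1]
    rw [hmap]
    exact foldl_dBump_bumped _ _ _ hnd ((PySem.Dict.contains_iff_mem_keys _ _).mp hc)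
  · have hc' : c.contains x = false := by simpa using hc
    rw [PySem.Dict.items_insert_of_not_contains _ _ hc', List.foldl_append,
        PySem.Dict.getD_of_not_contains _ _ hc', List.foldl_cons, List.foldl_nil]
    show dBump _ (x, 0 + 1) = _
    simp [dBump, dBump1]

-- CORE: per-element bumping equals counting first and merging the counts
theorem foldl_dBump1_eq_counter_fold (l : List (List String)) (d0 : PySem.Dict (List String) Int) :
    l.foldl dBump1 d0 = ((PySem.Dict.counter l).items).foldl dBump d0 := by
  induction l using List.reverseRecOn with
  | nil => rfl
  | append_singleton l x ih =>
    rw [List.foldl_append, List.foldl_cons, List.foldl_nil,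
        PySem.Dict.counter_append_singleton, ih]
    exact (foldl_items_modify _ _ _ (PySem.Dict.nodup_keys_counter _)).symm

theorem confronto_spec_aux (lista_tuple : List (List String)) (full_word_list : List String)
    (dizionario_conta : List (List String × Int)) :
    confronto lista_tuple full_word_list dizionario_conta
      = confronto_alt lista_tuple full_word_list dizionario_conta := by
  have hL : lista_tuple.foldl (fun d keyword =>
        if (PySem.List.pyRange 0 ((full_word_list.length : Int) - (keyword.length : Int) + 1) 1).any
            (fun i => PySem.List.slice full_word_list (some i) (some (i + (keyword.length : Int))) == keyword)
        then if d.contains keyword then d.insert keyword (d.getD keyword 0 + 1) else d.insert keyword 1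
        else d) (PySem.Dict.mk dizionario_conta)
      = (lista_tuple.filter (fun kw =>
          (PySem.List.pyRange 0 ((full_word_list.length : Int) - (kw.length : Int) + 1) 1).any
            (fun i => PySem.List.slice full_word_list (some i) (some (i + (kw.length : Int))) == kw))).foldl
          dBump1 (PySem.Dict.mk dizionario_conta) := by
    rw [← PySem.List.foldl_if_eq_foldl_filter _ dBump1]
    apply PySem.List.foldl_congr_mem
    intro d kw _
    by_cases hs : (PySem.List.pyRange 0 ((full_word_list.length : Int) - (kw.length : Int) + 1) 1).any
        (fun i => PySem.List.slice full_word_list (some i) (some (i + (kw.length : Int))) == kw) = true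
    · simp only [hs, if_true]
      by_cases hcon : d.contains kw = true
      · simp [hcon, dBump1]
      · have hcon' : d.contains kw = false := by simpa using hcon
        simp [hcon', dBump1, PySem.Dict.getD_of_not_contains _ _ hcon']
    · simp [hs]
  have hR : lista_tuple.foldl (fun f keyword =>
        if (((PySem.Set.ofList (lista_tuple.map (fun k => (k.length : Int)))).foldl (fun g n =>
            g.insert n (PySem.Set.ofList
              ((PySem.List.pyRange 0 ((full_word_list.length : Int) - n + 1) 1).map
                (fun i => PySem.List.slice full_word_list (some i) (some (i + n)))))) PySem.Dict.empty).getD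
            (keyword.length : Int) []).contains keyword
        then f.insert keyword (f.getD keyword 0 + 1)
        else f) PySem.Dict.empty
      = PySem.Dict.counter (lista_tuple.filter (fun kw =>
          (PySem.List.pyRange 0 ((full_word_list.length : Int) - (kw.length : Int) + 1) 1).any
            (fun i => PySem.List.slice full_word_list (some i) (some (i + (kw.length : Int))) == kw))) := by
    have hstep : lista_tuple.foldl (fun f keyword =>
          if (((PySem.Set.ofList (lista_tuple.map (fun k => (k.length : Int)))).foldl (fun g n =>
              g.insert n (PySem.Set.ofList
                ((PySem.List.pyRange 0 ((full_word_list.length : Int) - n + 1) 1).map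
                  (fun i => PySem.List.slice full_word_list (some i) (some (i + n)))))) PySem.Dict.empty).getD
              (keyword.length : Int) []).contains keyword
          then f.insert keyword (f.getD keyword 0 + 1)
          else f) PySem.Dict.empty
        = lista_tuple.foldl (fun (f : PySem.Dict (List String) Int) kw =>
          if (PySem.List.pyRange 0 ((full_word_list.length : Int) - (kw.length : Int) + 1) 1).any
              (fun i => PySem.List.slice full_word_list (some i) (some (i + (kw.length : Int))) == kw)
          then f.insert kw (f.getD kw 0 + 1) else f) PySem.Dict.empty := by
      apply PySem.List.foldl_congr_mem
      intro f kw hkw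
      rw [grams_contains_eq_scan lista_tuple full_word_list kw hkw]
    rw [hstep, PySem.List.foldl_if_eq_foldl_filter,
        PySem.Dict.foldl_insert_getD_add_one_eq_counter]
  show (lista_tuple.foldl (fun d keyword =>
        if (PySem.List.pyRange 0 ((full_word_list.length : Int) - (keyword.length : Int) + 1) 1).any
            (fun i => PySem.List.slice full_word_list (some i) (some (i + (keyword.length : Int))) == keyword)
        then if d.contains keyword then d.insert keyword (d.getD keyword 0 + 1) else d.insert keyword 1
        else d) (PySem.Dict.mk dizionario_conta)).items
    = ((lista_tuple.foldl (fun f keyword =>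
        if (((PySem.Set.ofList (lista_tuple.map (fun k => (k.length : Int)))).foldl (fun g n =>
            g.insert n (PySem.Set.ofList
              ((PySem.List.pyRange 0 ((full_word_list.length : Int) - n + 1) 1).map
                (fun i => PySem.List.slice full_word_list (some i) (some (i + n)))))) PySem.Dict.empty).getD
            (keyword.length : Int) []).contains keyword
        then f.insert keyword (f.getD keyword 0 + 1)
        else f) PySem.Dict.empty).items.foldl
        (fun d kc => d.insert kc.1 (d.getD kc.1 0 + kc.2)) (PySem.Dict.mk dizionario_conta)).items
  congr 1
  rw [hL, hR]
  exact foldl_dBump1_eq_counter_fold _ _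

-- ===== VERDICT (by name: the statement is the Claim_ definition above) =====
theorem confronto_spec : Claim_equal_confronto := by
  intro lt fw d _
  unfold Spec_confronto
  exact confronto_spec_aux lt fw d
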